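-- pv_equiv track=rewrite | github.com/vilas000/tp_IA | jogo.py | eh_distribuicao_valida
-- ===== SOURCE A (Python) =====
-- def distancia_manhattan(p1, p2):
--     """Calcula a distância de Manhattan (soma das diferenças absolutas das coordenadas)
--     entre dois pontos p1 e p2."""
--     if not p1 or not p2:
--         return 0
--     return abs(p1[0] - p2[0]) + abs(p1[1] - p2[1])
--
-- def eh_distribuicao_valida(contexto, tipo_item_atual, pos_atual):
--     """Verifica se a distância entre o item atual e os demais itens no contexto respeita
--     regras mínimas de distância para evitar agrupamentos próximos e facilitar o jogo."""
--     pos_jogador = contexto.get('JOGADOR')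
--
--     MIN_DIST_JOGADOR = 3  # distância mínima do jogador para outros itens
--     if pos_jogador and tipo_item_atual not in ['JOGADOR', 'SAIDA']:
--         if distancia_manhattan(pos_atual, pos_jogador) < MIN_DIST_JOGADOR:
--             return False
--
--     # Chave e espada não podem estar próximas (menos que 5 de distância)
--     if tipo_item_atual == 'CHAVE':
--         pos_espada = contexto.get('ESPADA')
--         if pos_espada and distancia_manhattan(pos_atual, pos_espada) < 5:
--             return False
--
--     if tipo_item_atual == 'ESPADA':
--         pos_chave = contexto.get('CHAVE')
--         if pos_chave and distancia_manhattan(pos_atual, pos_chave) < 5: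
--             return False
--
--     # Baús, chave e espada devem estar razoavelmente distantes entre si
--     if tipo_item_atual.startswith('BAU') or tipo_item_atual in ['CHAVE', 'ESPADA']:
--         for tipo, pos in contexto.items():
--             if (tipo.startswith('BAU') or tipo in ['CHAVE', 'ESPADA']) and tipo != tipo_item_atual:
--                 if distancia_manhattan(pos_atual, pos) < 3:
--                     return False
--
--     return True
-- ===== SOURCE B (Python) =====
-- def eh_distribuicao_valida(contexto, tipo_item_atual, pos_atual):
--     """Rule-table reformulation: one uniform pass over contexto, checking each item's
--     Manhattan distance against the minimum required for that ordered pair of types."""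
--     def clustered(t):
--         return t.startswith('BAU') or t in ('CHAVE', 'ESPADA')
--
--     def min_required(cur, other):
--         req = 0
--         if other == 'JOGADOR' and cur not in ('JOGADOR', 'SAIDA'):
--             req = 3
--         if clustered(cur) and clustered(other) and other != cur:
--             req = 3
--         if (cur, other) in (('CHAVE', 'ESPADA'), ('ESPADA', 'CHAVE')):
--             req = 5
--         return req
--
--     for tipo, pos in contexto.items():
--         if abs(pos_atual[0] - pos[0]) + abs(pos_atual[1] - pos[1]) < min_required(tipo_item_atual, tipo):
--             return False
--     return True
-- ===== Notes on version B (the rewrite author's own statement) =====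
-- stated objective: simpler
-- what changed: A's fixed chain of special-case checks (player lookup, CHAVE/ESPADA lookups, then a guarded pairwise loop) is replaced by a declarative rule table min_required(cur, other) and a single uniform pass over contexto.items() comparing each Manhattan distance against its required threshold.
import Mathlib
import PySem

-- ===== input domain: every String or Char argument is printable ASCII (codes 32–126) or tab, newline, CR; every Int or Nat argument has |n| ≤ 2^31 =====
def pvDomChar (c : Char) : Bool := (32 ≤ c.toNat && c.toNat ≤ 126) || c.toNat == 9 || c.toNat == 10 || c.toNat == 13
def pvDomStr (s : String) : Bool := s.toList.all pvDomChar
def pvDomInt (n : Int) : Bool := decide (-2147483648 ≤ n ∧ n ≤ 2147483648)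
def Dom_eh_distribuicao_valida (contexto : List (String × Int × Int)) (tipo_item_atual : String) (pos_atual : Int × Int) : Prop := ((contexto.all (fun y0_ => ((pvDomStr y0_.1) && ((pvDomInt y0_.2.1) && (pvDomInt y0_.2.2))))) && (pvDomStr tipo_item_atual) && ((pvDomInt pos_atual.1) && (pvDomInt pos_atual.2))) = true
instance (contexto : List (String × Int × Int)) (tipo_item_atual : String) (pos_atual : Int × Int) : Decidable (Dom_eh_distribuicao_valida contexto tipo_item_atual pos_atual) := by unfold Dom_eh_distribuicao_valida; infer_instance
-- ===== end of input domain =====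

-- B replaces A's fixed chain of special-case checks by a rule table (min_required per ordered
-- type pair) and ONE uniform pass over the items (objective: a simpler, uniform decomposition).

-- ===== PORT A =====
-- distancia_manhattan: positions are non-empty tuples, hence always truthy in Python,
-- so the 'if not p1 or not p2: return 0' branch can never fire on this input type.
def pvManhattan (p1 p2 : Int × Int) : Int :=
  |p1.1 - p2.1| + |p1.2 - p2.2|

-- 'p = contexto.get(K); … p and g(p) …' (positions are truthy): fails iff K is present and g holds
def pvCheckFail (d : PySem.Dict String (Int × Int)) (k : String) (g : Int × Int → Bool) : Bool :=
  match d.get? k with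
  | some p => g p
  | none => false

def eh_distribuicao_valida (contexto : List (String × Int × Int)) (tipo_item_atual : String) (pos_atual : Int × Int) : Bool :=
  let d := PySem.Dict.ofList contexto
  -- if pos_jogador and tipo_item_atual not in ['JOGADOR','SAIDA'] and dist < 3: return False
  if pvCheckFail d "JOGADOR" (fun pj =>
      !(tipo_item_atual == "JOGADOR" || tipo_item_atual == "SAIDA")
      && decide (pvManhattan pos_atual pj < 3)) then false else
  -- if tipo_item_atual == 'CHAVE' and pos_espada and dist < 5: return False
  if (tipo_item_atual == "CHAVE"
      && pvCheckFail d "ESPADA" (fun pe => decide (pvManhattan pos_atual pe < 5))) then false else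
  -- if tipo_item_atual == 'ESPADA' and pos_chave and dist < 5: return False
  if (tipo_item_atual == "ESPADA"
      && pvCheckFail d "CHAVE" (fun pc => decide (pvManhattan pos_atual pc < 5))) then false else
  -- final pairwise loop with early 'return False' ≡ all entries pass
  if PySem.Str.startswith tipo_item_atual "BAU" || tipo_item_atual == "CHAVE" || tipo_item_atual == "ESPADA" then
    d.items.all (fun tp =>
      !((PySem.Str.startswith tp.1 "BAU" || tp.1 == "CHAVE" || tp.1 == "ESPADA")
        && tp.1 != tipo_item_atual && decide (pvManhattan pos_atual tp.2 < 3)))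
  else true

-- ===== PORT B =====
def pvClustered (t : String) : Bool :=
  PySem.Str.startswith t "BAU" || t == "CHAVE" || t == "ESPADA"

def pvMinRequired (cur other : String) : Int :=
  let req : Int := 0
  let req := if other == "JOGADOR" && !(cur == "JOGADOR" || cur == "SAIDA") then 3 else req
  let req := if pvClustered cur && pvClustered other && other != cur then 3 else req
  let req := if (cur == "CHAVE" && other == "ESPADA") || (cur == "ESPADA" && other == "CHAVE") then 5 else req
  req

def eh_distribuicao_valida_alt (contexto : List (String × Int × Int)) (tipo_item_atual : String) (pos_atual : Int × Int) : Bool :=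
  -- loop with early 'return False' ≡ all entries pass
  (PySem.Dict.ofList contexto).items.all (fun tp =>
    decide (pvMinRequired tipo_item_atual tp.1 ≤ |pos_atual.1 - tp.2.1| + |pos_atual.2 - tp.2.2|))

-- ===== PRECONDITION & SPEC =====
def Spec_eh_distribuicao_valida (contexto : List (String × Int × Int)) (tipo_item_atual : String) (pos_atual : Int × Int) (out : Bool) : Prop := out = eh_distribuicao_valida_alt contexto tipo_item_atual pos_atual
instance (contexto : List (String × Int × Int)) (tipo_item_atual : String) (pos_atual : Int × Int) (out : Bool) : Decidable (Spec_eh_distribuicao_valida contexto tipo_item_atual pos_atual out) := by unfold Spec_eh_distribuicao_valida; infer_instance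

-- ===== CLAIM (what is proved, stated in full; the proofs are below) =====
def Claim_equal_eh_distribuicao_valida : Prop := ∀ (contexto : List (String × Int × Int)) (tipo_item_atual : String) (pos_atual : Int × Int), Dom_eh_distribuicao_valida contexto tipo_item_atual pos_atual → Spec_eh_distribuicao_valida contexto tipo_item_atual pos_atual (eh_distribuicao_valida contexto tipo_item_atual pos_atual)

-- ===== LEMMAS AND PROOFS =====

-- a get-and-test check fails iff no item with that key satisfies the test (keys unique)
theorem pvCheckFail_eq_false_iff (d : PySem.Dict String (Int × Int)) (hnd : d.keys.Nodup)
    (k : String) (g : Int × Int → Bool) :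
    pvCheckFail d k g = false ↔ ∀ tp ∈ d.items, tp.1 = k → g tp.2 = false := by
  unfold pvCheckFail
  cases h : d.get? k with
  | none =>
    simp only [true_iff]
    intro tp hmem hk
    have hkeys : k ∉ d.keys := (PySem.Dict.get?_eq_none_iff_not_mem_keys d k).mp h
    exact absurd (hk ▸ PySem.Dict.mem_keys_of_mem_items (d := d) hmem) hkeys
  | some v =>
    constructor
    · intro hg tp hmem hk
      have := PySem.Dict.get?_of_mem_items (d := d) (k := tp.1) (v := tp.2) (by simpa using hmem) hnd
      rw [hk, h] at this
      have hv : tp.2 = v := by injection this with h'; exact h'.symm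
      rwa [hv]
    · intro hall
      have hmem := PySem.Dict.mem_items_of_get?_eq_some (d := d) h
      exact hall (k, v) hmem rfl


-- per-entry characterisation of the rule table
theorem pvMinRequired_le_iff (cur t : String) (D : Int) (hD : 0 ≤ D) :
    pvMinRequired cur t ≤ D ↔
      (((t = "JOGADOR" ∧ ¬(cur = "JOGADOR" ∨ cur = "SAIDA")) → 3 ≤ D) ∧
       (((cur = "CHAVE" ∧ t = "ESPADA") ∨ (cur = "ESPADA" ∧ t = "CHAVE")) → 5 ≤ D) ∧
       ((pvClustered cur = true ∧ pvClustered t = true ∧ t ≠ cur) → 3 ≤ D)) := by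
  have cJ : pvClustered "JOGADOR" = false := by decide
  simp only [pvMinRequired, Bool.or_eq_true, Bool.and_eq_true, beq_iff_eq,
    Bool.not_eq_eq_eq_not, Bool.not_true, Bool.or_eq_false_iff, beq_eq_false_iff_ne,
    ne_eq, bne_iff_ne]
  split_ifs with h3 h2 h1
  · rcases h3 with ⟨hc,ht⟩|⟨hc,ht⟩ <;> subst hc <;> subst ht <;>
      simp [pvClustered, PySem.Str.startswith] <;> omega
  · have hcc := h2.1.1
    have hct := h2.1.2
    have hne := h2.2
    have h1f : ¬(t = "JOGADOR") := fun hj => by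
      rw [hj] at hct; rw [cJ] at hct; exact Bool.false_ne_true hct
    constructor
    · exact fun h => ⟨fun hj => absurd hj.1 h1f, fun hce => absurd hce h3, fun _ => h⟩
    · exact fun h => h.2.2 ⟨hcc, hct, hne⟩
  · obtain ⟨ht, hn1, hn2⟩ := h1
    have hctf : pvClustered t = false := by rw [ht]; exact cJ
    constructor
    · intro h
      refine ⟨fun _ => h, fun hce => ?_, fun hc3 => absurd hc3.2.1 (by simp [hctf])⟩
      rcases hce with ⟨_, ht2⟩|⟨_, ht2⟩ <;> rw [ht2] at ht <;> simp at ht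
    · intro h; exact h.1 ⟨ht, fun hor => hor.elim hn1 hn2⟩
  · constructor
    · refine fun _ => ⟨fun hc1 => absurd ⟨hc1.1, fun a => hc1.2 (Or.inl a), fun a => hc1.2 (Or.inr a)⟩ h1,
        fun hce => absurd hce h3, fun hc3 => absurd ⟨⟨hc3.1, hc3.2.1⟩, hc3.2.2⟩ h2⟩
    · intro _; exact hD

-- the chain of special-case checks equals the uniform rule-table pass, for unique keys
theorem pvMain (d : PySem.Dict String (Int × Int)) (hnd : d.keys.Nodup)
    (cur : String) (pos : Int × Int) :
    (if pvCheckFail d "JOGADOR" (fun pj =>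
        !(cur == "JOGADOR" || cur == "SAIDA") && decide (pvManhattan pos pj < 3)) then false else
     if (cur == "CHAVE"
        && pvCheckFail d "ESPADA" (fun pe => decide (pvManhattan pos pe < 5))) then false else
     if (cur == "ESPADA"
        && pvCheckFail d "CHAVE" (fun pc => decide (pvManhattan pos pc < 5))) then false else
     if PySem.Str.startswith cur "BAU" || cur == "CHAVE" || cur == "ESPADA" then
       d.items.all (fun tp =>
         !((PySem.Str.startswith tp.1 "BAU" || tp.1 == "CHAVE" || tp.1 == "ESPADA")
           && tp.1 != cur && decide (pvManhattan pos tp.2 < 3)))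
     else true) =
    d.items.all (fun tp =>
      decide (pvMinRequired cur tp.1 ≤ |pos.1 - tp.2.1| + |pos.2 - tp.2.2|)) := by
  have hsplit : ∀ (a b c x : Bool),
      (if a then false else if b then false else if c then false else x) = (!a && !b && !c && x) := by
    decide
  rw [hsplit, Bool.eq_iff_iff]
  simp only [Bool.and_eq_true, Bool.not_eq_true', List.all_eq_true, decide_eq_true_eq, and_assoc]
  constructor
  · rintro ⟨h1, h2, h3, h4⟩ tp hmem
    have hD : (0 : Int) ≤ |pos.1 - tp.2.1| + |pos.2 - tp.2.2| :=
      add_nonneg (abs_nonneg _) (abs_nonneg _)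
    rw [pvMinRequired_le_iff _ _ _ hD]
    refine ⟨?_, ?_, ?_⟩
    · rintro ⟨ht, hns⟩
      have := (pvCheckFail_eq_false_iff d hnd _ _).mp h1 tp hmem ht
      simp only [Bool.and_eq_false_iff, Bool.not_eq_false', Bool.or_eq_true, beq_iff_eq,
        decide_eq_false_iff_not, pvManhattan, not_lt] at this
      rcases this with h | h
      · exact absurd h hns
      · omega
    · rintro (⟨hc, ht⟩ | ⟨hc, ht⟩)
      · subst hc
        simp only [BEq.rfl, Bool.true_and] at h2
        have := (pvCheckFail_eq_false_iff d hnd _ _).mp h2 tp hmem ht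
        simp only [decide_eq_false_iff_not, pvManhattan, not_lt] at this
        omega
      · subst hc
        simp only [BEq.rfl, Bool.true_and] at h3
        have := (pvCheckFail_eq_false_iff d hnd _ _).mp h3 tp hmem ht
        simp only [decide_eq_false_iff_not, pvManhattan, not_lt] at this
        omega
    · rintro ⟨hcc, hct, hne⟩
      rw [if_pos (show (PySem.Str.startswith cur "BAU" || cur == "CHAVE" || cur == "ESPADA") = true from hcc)] at h4
      have := List.all_eq_true.mp h4 tp hmem
      simp only [show (PySem.Str.startswith tp.1 "BAU" || tp.1 == "CHAVE" || tp.1 == "ESPADA") = pvClustered tp.1 from rfl,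
        hct, Bool.true_and, Bool.not_eq_true', Bool.and_eq_false_iff, bne_eq_false_iff_eq,
        decide_eq_false_iff_not, pvManhattan, not_lt] at this
      rcases this with h | h
      · exact absurd h hne
      · omega
  · intro hall
    have key : ∀ tp ∈ d.items,
        (((tp.1 = "JOGADOR" ∧ ¬(cur = "JOGADOR" ∨ cur = "SAIDA")) → 3 ≤ |pos.1 - tp.2.1| + |pos.2 - tp.2.2|) ∧
         (((cur = "CHAVE" ∧ tp.1 = "ESPADA") ∨ (cur = "ESPADA" ∧ tp.1 = "CHAVE")) → 5 ≤ |pos.1 - tp.2.1| + |pos.2 - tp.2.2|) ∧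
         ((pvClustered cur = true ∧ pvClustered tp.1 = true ∧ tp.1 ≠ cur) → 3 ≤ |pos.1 - tp.2.1| + |pos.2 - tp.2.2|)) := by
      intro tp hmem
      have hD : (0 : Int) ≤ |pos.1 - tp.2.1| + |pos.2 - tp.2.2| :=
        add_nonneg (abs_nonneg _) (abs_nonneg _)
      exact (pvMinRequired_le_iff _ _ _ hD).mp (hall tp hmem)
    refine ⟨?_, ?_, ?_, ?_⟩
    · apply (pvCheckFail_eq_false_iff d hnd _ _).mpr
      intro tp hmem ht
      by_cases hns : cur = "JOGADOR" ∨ cur = "SAIDA"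
      · simp only [Bool.and_eq_false_iff, Bool.not_eq_false', Bool.or_eq_true, beq_iff_eq]
        exact Or.inl hns
      · have := (key tp hmem).1 ⟨ht, hns⟩
        simp only [Bool.and_eq_false_iff, decide_eq_false_iff_not, pvManhattan, not_lt]
        exact Or.inr (by omega)
    · by_cases hc : cur = "CHAVE"
      · subst hc
        simp only [BEq.rfl, Bool.true_and]
        apply (pvCheckFail_eq_false_iff d hnd _ _).mpr
        intro tp hmem ht
        have := (key tp hmem).2.1 (Or.inl ⟨rfl, ht⟩)
        simp only [decide_eq_false_iff_not, pvManhattan, not_lt]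
        omega
      · simp [hc]
    · by_cases hc : cur = "ESPADA"
      · subst hc
        simp only [BEq.rfl, Bool.true_and]
        apply (pvCheckFail_eq_false_iff d hnd _ _).mpr
        intro tp hmem ht
        have := (key tp hmem).2.1 (Or.inr ⟨rfl, ht⟩)
        simp only [decide_eq_false_iff_not, pvManhattan, not_lt]
        omega
      · simp [hc]
    · by_cases hcc : pvClustered cur = true
      · rw [if_pos (show (PySem.Str.startswith cur "BAU" || cur == "CHAVE" || cur == "ESPADA") = true from hcc)]
        rw [List.all_eq_true]
        intro tp hmem
        simp only [show (PySem.Str.startswith tp.1 "BAU" || tp.1 == "CHAVE" || tp.1 == "ESPADA") = pvClustered tp.1 from rfl,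
          Bool.not_eq_true', Bool.and_eq_false_iff, bne_eq_false_iff_eq, decide_eq_false_iff_not,
          pvManhattan, not_lt]
        by_cases hct : pvClustered tp.1 = true
        · by_cases hne : tp.1 = cur
          · exact Or.inl (Or.inr hne)
          · have := (key tp hmem).2.2 ⟨hcc, hct, hne⟩
            exact Or.inr (by omega)
        · exact Or.inl (Or.inl (by simpa using hct))
      · rw [if_neg (show ¬((PySem.Str.startswith cur "BAU" || cur == "CHAVE" || cur == "ESPADA") = true) from hcc)]

-- ===== VERDICT (by name: the statement is the Claim_ definition above) =====
theorem eh_distribuicao_valida_spec : Claim_equal_eh_distribuicao_valida := by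
  intro contexto tipo_item_atual pos_atual _
  unfold Spec_eh_distribuicao_valida eh_distribuicao_valida eh_distribuicao_valida_alt
  exact pvMain (PySem.Dict.ofList contexto) (PySem.Dict.nodup_keys_ofList contexto)
    tipo_item_atual pos_atual
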